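-- pv_equiv track=rewrite | github.com/ahaiceid/adventofcode.com | 2024/day/4/solver.py | generate_diagonals
-- ===== SOURCE A (Python) =====
-- def generate_diagonals(word_search):
--     size = len(word_search)
--     if len(word_search[0].strip())!=size:
--         raise RuntimeError(
--             "word search not square. ({} high, {} wide).".format(
--                 size, len(word_search[0].strip())))
--     for i in range(size-1,-1,-1):
--         line = ""
--         for j in range(0,size-i):
--             line += word_search[j][j+i]
--         yield line
--     for j in range(1,size):
--         line = ""
--         for i in range(0,size-j):
--             line += word_search[j+i][i]
--         yield line
--     for i in range(size-1,-1,-1):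
--         line = ""
--         for j in range(0,size-i):
--             line += word_search[size-j-1][j+i]
--         yield line
--     for j in range(1,size):
--         line = ""
--         for i in range(0,size-j):
--             line += word_search[size-(j+i)-1][i]
--         yield line
-- ===== SOURCE B (Python) =====
-- def _diag_buckets(rows):
--     size = len(rows)
--     cells = [(c - r, rows[r][c]) for r in range(size) for c in range(size)]
--     buckets = {}
--     for key, ch in cells:
--         buckets.setdefault(key, []).append(ch)
--     return buckets
--
--
-- def generate_diagonals(word_search):
--     size = len(word_search)
--     if len(word_search[0].strip()) != size:
--         raise RuntimeError(
--             "word search not square. ({} high, {} wide).".format(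
--                 size, len(word_search[0].strip())))
--     down = _diag_buckets(word_search)
--     anti = _diag_buckets(word_search[::-1])
--     keys = list(range(size - 1, -size, -1))
--     for k in keys:
--         yield "".join(down[k])
--     for k in keys:
--         yield "".join(anti[k])
-- ===== Notes on version B (the rewrite author's own statement) =====
-- stated objective: alternative
-- what changed: A emits diagonals with four separate nested index loops; B makes one pass over all cells grouping characters into a dict of buckets keyed by c-r (once for the grid, once for its vertical flip) and then emits the buckets in key order size-1..-(size-1).
import Mathlib
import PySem

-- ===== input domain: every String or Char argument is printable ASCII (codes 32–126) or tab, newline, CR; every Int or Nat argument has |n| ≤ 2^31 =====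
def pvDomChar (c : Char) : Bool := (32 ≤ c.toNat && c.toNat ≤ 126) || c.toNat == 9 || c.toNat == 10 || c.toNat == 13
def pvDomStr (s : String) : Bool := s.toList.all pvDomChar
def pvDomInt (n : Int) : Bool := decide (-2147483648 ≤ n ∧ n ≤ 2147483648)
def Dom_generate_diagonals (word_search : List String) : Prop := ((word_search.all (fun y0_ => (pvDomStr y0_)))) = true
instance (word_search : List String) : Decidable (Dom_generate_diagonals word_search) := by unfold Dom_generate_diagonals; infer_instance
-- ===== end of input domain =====

-- B replaces A's four hand-indexed emission loops by dicts of diagonal buckets keyed by c-r (one for the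
-- grid, one for its vertical flip), emitted in key order: an alternative decomposition, same cost.
-- A and B are generators; the equivalence is about the list of yielded values.

-- shared indexing helper: rows[r][c] (total stand-in; indices are in range under Pre_)
def chAt (rows : List String) (r c : Int) : Char :=
  (PySem.Str.pyGet? ((PySem.List.pyGet? rows r).getD "") c).getD ' '

-- ===== PORT A =====
def generate_diagonals (word_search : List String) : List String :=
  if PySem.Str.len (PySem.Str.strip ((PySem.List.pyGet? word_search 0).getD "")) ≠ (word_search.length : Int)
  then []  -- Python raises RuntimeError here (excluded by Pre_)
  else
    ((PySem.List.pyRange ((word_search.length : Int) - 1) (-1) (-1)).map (fun i =>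
        String.ofList ((PySem.List.pyRange 0 ((word_search.length : Int) - i) 1).foldl
          (fun line j => line ++ [chAt word_search j (j + i)]) [])))
    ++ ((PySem.List.pyRange 1 (word_search.length : Int) 1).map (fun j =>
        String.ofList ((PySem.List.pyRange 0 ((word_search.length : Int) - j) 1).foldl
          (fun line i => line ++ [chAt word_search (j + i) i]) [])))
    ++ ((PySem.List.pyRange ((word_search.length : Int) - 1) (-1) (-1)).map (fun i =>
        String.ofList ((PySem.List.pyRange 0 ((word_search.length : Int) - i) 1).foldl
          (fun line j => line ++ [chAt word_search ((word_search.length : Int) - j - 1) (j + i)]) [])))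
    ++ ((PySem.List.pyRange 1 (word_search.length : Int) 1).map (fun j =>
        String.ofList ((PySem.List.pyRange 0 ((word_search.length : Int) - j) 1).foldl
          (fun line i => line ++ [chAt word_search ((word_search.length : Int) - (j + i) - 1) i]) [])))

-- ===== PORT B =====
-- _diag_buckets(rows): all cells as (c - r, rows[r][c]) pairs, grouped into a dict by key
def diagBuckets (rows : List String) : PySem.Dict Int (List Char) :=
  ((PySem.List.pyRange 0 (rows.length : Int) 1).flatMap (fun r =>
      (PySem.List.pyRange 0 (rows.length : Int) 1).map (fun c => (c - r, chAt rows r c)))).foldl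
    (fun d p => d.modify p.1 [] (· ++ [p.2])) PySem.Dict.empty

def generate_diagonals_alt (word_search : List String) : List String :=
  if PySem.Str.len (PySem.Str.strip ((PySem.List.pyGet? word_search 0).getD "")) ≠ (word_search.length : Int)
  then []  -- Python raises RuntimeError here (excluded by Pre_)
  else
    ((PySem.List.pyRange ((word_search.length : Int) - 1) (-(word_search.length : Int)) (-1)).map
      (fun k => String.ofList ((diagBuckets word_search).getD k [])))
    ++ ((PySem.List.pyRange ((word_search.length : Int) - 1) (-(word_search.length : Int)) (-1)).map
      (fun k => String.ofList ((diagBuckets ((PySem.List.slice? word_search none none (-1)).getD [])).getD k [])))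

-- ===== PRECONDITION & SPEC =====
-- Pre_ excludes exactly the inputs where A raises: the empty grid (IndexError on word_search[0]),
-- a first row whose stripped length differs from the height (the explicit RuntimeError), and rows
-- shorter than the height (IndexError while reading a diagonal).
def Pre_generate_diagonals (word_search : List String) : Prop :=
  word_search ≠ [] ∧
  (PySem.Str.strip (word_search.headD "")).toList.length = word_search.length ∧
  ∀ s ∈ word_search, word_search.length ≤ s.toList.length
instance (word_search : List String) : Decidable (Pre_generate_diagonals word_search) := by
  unfold Pre_generate_diagonals; infer_instance

def pvWitness_generate_diagonals : List String := ["ab", "cd"]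

def Spec_generate_diagonals (word_search : List String) (out : List String) : Prop := out = generate_diagonals_alt word_search
instance (word_search : List String) (out : List String) : Decidable (Spec_generate_diagonals word_search out) := by unfold Spec_generate_diagonals; infer_instance

-- ===== CLAIM (what is proved, stated in full; the proofs are below) =====
def Claim_equal_generate_diagonals : Prop := ∀ (word_search : List String), Dom_generate_diagonals word_search → Pre_generate_diagonals word_search → Spec_generate_diagonals word_search (generate_diagonals word_search)

-- ===== LEMMAS AND PROOFS =====

theorem flatMap_singleton_of {α β : Type} {l : List α} {f : α → List β} {g : α → β}
    (h : ∀ x ∈ l, f x = [g x]) : l.flatMap f = l.map g := by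
  induction l with
  | nil => rfl
  | cons a l ih =>
      rw [List.flatMap_cons, h a (List.mem_cons_self), List.map_cons,
        ih (fun x hx => h x (List.mem_cons_of_mem a hx))]
      rfl

theorem flatMap_nil_of {α β : Type} {l : List α} {f : α → List β}
    (h : ∀ x ∈ l, f x = []) : l.flatMap f = [] :=
  List.flatMap_eq_nil_iff.mpr h

theorem filter_pyRange_eq_key (n : Nat) (r k : Int) :
    (PySem.List.pyRange 0 (n : Int) 1).filter (fun c => c - r == k)
      = if 0 ≤ k + r ∧ k + r < (n : Int) then [k + r] else [] := by
  induction n with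
  | zero =>
      rw [PySem.List.pyRange_one_eq_nil (by omega), if_neg (by omega)]
      rfl
  | succ m ih =>
      push_cast
      rw [PySem.List.pyRange_one_succ_right (by omega), List.filter_append, ih]
      by_cases h : (m : Int) - r = k
      · rw [if_neg (by omega), if_pos (by omega)]
        simp only [List.nil_append, List.filter_cons, List.filter_nil]
        rw [if_pos (by simpa using h)]
        have : k + r = (m : Int) := by omega
        rw [this]
      · have hb : ((m : Int) - r == k) = false := by simpa using h
        simp only [List.filter_cons, List.filter_nil, hb, Bool.false_eq_true, if_false]
        by_cases h2 : 0 ≤ k + r ∧ k + r < (m : Int)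
        · rw [if_pos h2, if_pos (by omega)]
          rfl
        · rw [if_neg h2, if_neg (by omega)]
          rfl

theorem bucket_getD (rows : List String) (k : Int) :
    (diagBuckets rows).getD k []
      = (PySem.List.pyRange 0 (rows.length : Int) 1).flatMap (fun r =>
          if 0 ≤ k + r ∧ k + r < (rows.length : Int) then [chAt rows r (k + r)] else []) := by
  unfold diagBuckets
  rw [PySem.Dict.getD_foldl_modify_append, PySem.Dict.getD_empty, List.nil_append,
      List.filter_flatMap, List.map_flatMap]
  apply List.flatMap_congr
  intro r _
  rw [List.filter_map, List.map_map]
  have hcomp : ((fun (p : Int × Char) => p.1 == k) ∘ (fun c => (c - r, chAt rows r c)))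
      = (fun c => c - r == k) := rfl
  rw [hcomp, filter_pyRange_eq_key rows.length r k]
  by_cases h : 0 ≤ k + r ∧ k + r < (rows.length : Int)
  · rw [if_pos h, if_pos h]; rfl
  · rw [if_neg h, if_neg h]; rfl

theorem bucket_nonneg (rows : List String) (i : Int) (h0 : 0 ≤ i) (h1 : i ≤ (rows.length : Int)) :
    (diagBuckets rows).getD i []
      = (PySem.List.pyRange 0 ((rows.length : Int) - i) 1).map (fun j => chAt rows j (j + i)) := by
  rw [bucket_getD,
      PySem.List.pyRange_one_append 0 ((rows.length : Int) - i) (rows.length : Int) (by omega) (by omega),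
      List.flatMap_append]
  have h2 : (PySem.List.pyRange ((rows.length : Int) - i) (rows.length : Int) 1).flatMap
      (fun r => if 0 ≤ i + r ∧ i + r < (rows.length : Int) then [chAt rows r (i + r)] else []) = [] := by
    apply flatMap_nil_of
    intro r hr
    rw [PySem.List.mem_pyRange_one] at hr
    rw [if_neg (by omega)]
  rw [h2, List.append_nil]
  apply flatMap_singleton_of
  intro r hr
  rw [PySem.List.mem_pyRange_one] at hr
  rw [if_pos (by omega), show i + r = r + i from by ring]

theorem bucket_neg (rows : List String) (j : Int) (h0 : 1 ≤ j) (h1 : j ≤ (rows.length : Int)) :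
    (diagBuckets rows).getD (-j) []
      = (PySem.List.pyRange 0 ((rows.length : Int) - j) 1).map (fun t => chAt rows (j + t) t) := by
  rw [bucket_getD,
      PySem.List.pyRange_one_append 0 j (rows.length : Int) (by omega) (by omega),
      List.flatMap_append]
  have h2 : (PySem.List.pyRange 0 j 1).flatMap
      (fun r => if 0 ≤ -j + r ∧ -j + r < (rows.length : Int) then [chAt rows r (-j + r)] else []) = [] := by
    apply flatMap_nil_of
    intro r hr
    rw [PySem.List.mem_pyRange_one] at hr
    rw [if_neg (by omega)]
  rw [h2, List.nil_append]
  rw [flatMap_singleton_of (g := fun r => chAt rows r (-j + r)) (by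
    intro r hr
    rw [PySem.List.mem_pyRange_one] at hr
    rw [if_pos (by omega)])]
  rw [PySem.List.pyRange_one j (rows.length : Int), PySem.List.pyRange_one 0 ((rows.length : Int) - j),
      List.map_map, List.map_map]
  have : ((rows.length : Int) - j - 0).toNat = ((rows.length : Int) - j).toNat := by omega
  rw [this]
  apply List.map_congr_left
  intro t _
  simp only [Function.comp_def]
  rw [show -j + (j + (t : Int)) = (t : Int) from by ring, show (0 : Int) + (t : Int) = (t : Int) from by ring]

theorem keys_split (n : Nat) :
    PySem.List.pyRange ((n : Int) - 1) (-(n : Int)) (-1)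
      = PySem.List.pyRange ((n : Int) - 1) (-1) (-1)
        ++ (PySem.List.pyRange 1 (n : Int) 1).map (fun j => -j) := by
  rw [PySem.List.pyRange_neg_one, PySem.List.pyRange_neg_one, PySem.List.pyRange_one]
  cases n with
  | zero => simp
  | succ m =>
      have e1 : (((m + 1 : Nat) : Int) - 1 - -((m + 1 : Nat) : Int)).toNat = (m + 1) + m := by
        push_cast; omega
      have e2 : (((m + 1 : Nat) : Int) - 1 - -1).toNat = m + 1 := by push_cast; omega
      have e3 : (((m + 1 : Nat) : Int) - 1).toNat = m := by push_cast; omega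
      rw [e1, e2, e3, List.range_add, List.map_append, List.map_map, List.map_map]
      congr 1
      apply List.map_congr_left
      intro t _
      simp only [Function.comp_def]
      push_cast
      omega

theorem chAt_reverse (rows : List String) (r c : Int) (h0 : 0 ≤ r) (h1 : r < (rows.length : Int)) :
    chAt rows.reverse r c = chAt rows ((rows.length : Int) - 1 - r) c := by
  unfold chAt
  rw [PySem.List.pyGet?_of_nonneg _ h0, PySem.List.pyGet?_of_nonneg _ (by omega : (0:Int) ≤ (rows.length : Int) - 1 - r)]
  rw [List.getElem?_reverse (by omega : r.toNat < rows.length)]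
  have : rows.length - 1 - r.toNat = ((rows.length : Int) - 1 - r).toNat := by omega
  rw [this]

set_option maxHeartbeats 2000000 in
theorem main_eq (ws : List String) : generate_diagonals ws = generate_diagonals_alt ws := by
  unfold generate_diagonals generate_diagonals_alt
  split_ifs with hg
  · rfl
  · rw [PySem.List.slice?_none_none_neg_one, Option.getD_some, keys_split ws.length,
        List.map_append, List.map_append]
    have hA1 : (PySem.List.pyRange ((ws.length : Int) - 1) (-1) (-1)).map (fun i =>
        String.ofList ((PySem.List.pyRange 0 ((ws.length : Int) - i) 1).foldl
          (fun line j => line ++ [chAt ws j (j + i)]) []))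
        = (PySem.List.pyRange ((ws.length : Int) - 1) (-1) (-1)).map
          (fun k => String.ofList ((diagBuckets ws).getD k [])) := by
      apply List.map_congr_left
      intro i hi
      rw [PySem.List.mem_pyRange_neg_one] at hi
      rw [PySem.List.foldl_append_singleton_eq_map, List.nil_append,
          bucket_nonneg ws i (by omega) (by omega)]
    have hA2 : (PySem.List.pyRange 1 (ws.length : Int) 1).map (fun j =>
        String.ofList ((PySem.List.pyRange 0 ((ws.length : Int) - j) 1).foldl
          (fun line i => line ++ [chAt ws (j + i) i]) []))
        = ((PySem.List.pyRange 1 (ws.length : Int) 1).map (fun j => -j)).map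
          (fun k => String.ofList ((diagBuckets ws).getD k [])) := by
      rw [List.map_map]
      apply List.map_congr_left
      intro j hj
      rw [PySem.List.mem_pyRange_one] at hj
      simp only [Function.comp_def]
      rw [PySem.List.foldl_append_singleton_eq_map, List.nil_append,
          bucket_neg ws j (by omega) (by omega)]
    have hrevlen : ((ws.reverse.length : Int)) = (ws.length : Int) := by simp
    have hA3 : (PySem.List.pyRange ((ws.length : Int) - 1) (-1) (-1)).map (fun i =>
        String.ofList ((PySem.List.pyRange 0 ((ws.length : Int) - i) 1).foldl
          (fun line j => line ++ [chAt ws ((ws.length : Int) - j - 1) (j + i)]) []))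
        = (PySem.List.pyRange ((ws.length : Int) - 1) (-1) (-1)).map
          (fun k => String.ofList ((diagBuckets ws.reverse).getD k [])) := by
      apply List.map_congr_left
      intro i hi
      rw [PySem.List.mem_pyRange_neg_one] at hi
      rw [PySem.List.foldl_append_singleton_eq_map, List.nil_append,
          bucket_nonneg ws.reverse i (by omega) (by rw [hrevlen]; omega), hrevlen]
      congr 1
      apply List.map_congr_left
      intro j hj
      rw [PySem.List.mem_pyRange_one] at hj
      rw [chAt_reverse ws j (j + i) (by omega) (by omega),
          show (ws.length : Int) - 1 - j = (ws.length : Int) - j - 1 from by ring]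
    have hA4 : (PySem.List.pyRange 1 (ws.length : Int) 1).map (fun j =>
        String.ofList ((PySem.List.pyRange 0 ((ws.length : Int) - j) 1).foldl
          (fun line i => line ++ [chAt ws ((ws.length : Int) - (j + i) - 1) i]) []))
        = ((PySem.List.pyRange 1 (ws.length : Int) 1).map (fun j => -j)).map
          (fun k => String.ofList ((diagBuckets ws.reverse).getD k [])) := by
      rw [List.map_map]
      apply List.map_congr_left
      intro j hj
      rw [PySem.List.mem_pyRange_one] at hj
      simp only [Function.comp_def]
      rw [PySem.List.foldl_append_singleton_eq_map, List.nil_append,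
          bucket_neg ws.reverse j (by omega) (by rw [hrevlen]; omega), hrevlen]
      congr 1
      apply List.map_congr_left
      intro t ht
      rw [PySem.List.mem_pyRange_one] at ht
      rw [chAt_reverse ws (j + t) t (by omega) (by omega),
          show (ws.length : Int) - 1 - (j + t) = (ws.length : Int) - (j + t) - 1 from by ring]
    rw [hA1, hA2, hA3, hA4]
    simp only [List.append_assoc]

-- ===== VERDICT (by name: the statement is the Claim_ definition above) =====
set_option maxHeartbeats 1000000 in
theorem generate_diagonals_spec : Claim_equal_generate_diagonals := by
  unfold Claim_equal_generate_diagonals Spec_generate_diagonals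
  intro ws _ _
  exact main_eq ws
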